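-- pv_equiv track=rewrite | github.com/its-sachin/Codeforces | Summer of CP/q1.py | patternj
-- ===== SOURCE A (Python) =====
-- def palindrome(s):
--     n = len(s)
--     i=0
--     j=n-1
--
--     while(i<j):
--         if (s[i]!=s[j]):
--             return False
--         i+=1
--         j-=1
--     return True
--
-- def patternj(s):
--     n = len(s)
--     if (n==1 or n==0):
--         return True
--     if (palindrome(s)):
--         return patternj(s[:n//2]) and patternj(s[(n+1)//2:])
--     else:
--         return False
-- ===== SOURCE B (Python) =====
-- def patternj(s):
--     # Iterative: a palindrome's right half is the mirror of its left half,
--     # so it suffices to check palindromicity down the chain of left halves.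
--     while len(s) > 1:
--         if s != s[::-1]:
--             return False
--         s = s[:len(s) // 2]
--     return True
-- ===== Notes on version B (the rewrite author's own statement) =====
-- stated objective: faster
-- what changed: B replaces A's recursion into both halves with a single iterative chain over left halves: since s is a palindrome, its right half is the mirror image of its left half and has the same property, so one half-check per level suffices.
import Mathlib
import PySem

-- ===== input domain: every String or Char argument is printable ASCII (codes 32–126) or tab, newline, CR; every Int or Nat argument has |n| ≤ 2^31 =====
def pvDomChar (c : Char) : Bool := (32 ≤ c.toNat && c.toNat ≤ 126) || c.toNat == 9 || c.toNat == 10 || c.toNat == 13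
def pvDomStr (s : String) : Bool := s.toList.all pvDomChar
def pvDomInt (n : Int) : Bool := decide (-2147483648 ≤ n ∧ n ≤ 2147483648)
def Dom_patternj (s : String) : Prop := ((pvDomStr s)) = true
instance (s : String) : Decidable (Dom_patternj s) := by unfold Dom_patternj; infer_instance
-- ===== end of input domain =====

-- B replaces A's recursion into both halves by one iterative chain of left halves
-- (the right half of a palindrome is the mirror image of its left half).

-- ===== PORT A =====
-- helper 'palindrome': while(i<j): if s[i]!=s[j]: return False; i+=1; j-=1 / return True
def palA (l : List Char) (i j : Int) : Bool :=
  if _h : i < j then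
    if PySem.List.pyGet? l i ≠ PySem.List.pyGet? l j then false
    else palA l (i + 1) (j - 1)
  else true
termination_by (j - i).toNat
decreasing_by omega

def patternjList (l : List Char) : Bool :=
  let n : Int := l.length
  if n == 1 || n == 0 then true
  else if palA l 0 (n - 1) then
    patternjList (PySem.List.slice l none (some (PySem.Int.floordiv n 2))) &&
    patternjList (PySem.List.slice l (some (PySem.Int.floordiv (n + 1) 2)) none)
  else false
termination_by l.length
decreasing_by
  · have hfd : PySem.Int.floordiv ((l.length : Nat) : Int) 2 = ((l.length / 2 : Nat) : Int) := by
      exact_mod_cast PySem.Int.floordiv_natCast l.length 2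
    rw [hfd, PySem.List.slice_to_natCast]
    simp only [List.length_take]
    rename_i hn _
    simp only [beq_iff_eq, Bool.or_eq_true, not_or] at hn
    omega
  · have hfd : PySem.Int.floordiv (((l.length : Nat) : Int) + 1) 2 = (((l.length + 1) / 2 : Nat) : Int) := by
      have h := PySem.Int.floordiv_natCast (l.length + 1) 2
      push_cast at h ⊢
      exact h
    rw [hfd, PySem.List.slice_from_natCast]
    simp only [List.length_drop]
    rename_i hn _
    simp only [beq_iff_eq, Bool.or_eq_true, not_or] at hn
    omega

def patternj (s : String) : Bool := patternjList s.toList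

-- ===== PORT B =====
def patternjAltList (l : List Char) : Bool :=
  if l.length > 1 then
    if l ≠ (PySem.List.slice? l none none (-1)).getD [] then false
    else patternjAltList (PySem.List.slice l none (some (PySem.Int.floordiv (l.length : Int) 2)))
  else true
termination_by l.length
decreasing_by
  have hfd : PySem.Int.floordiv ((l.length : Nat) : Int) 2 = ((l.length / 2 : Nat) : Int) := by
    exact_mod_cast PySem.Int.floordiv_natCast l.length 2
  rw [hfd, PySem.List.slice_to_natCast]
  simp only [List.length_take]
  omega

def patternj_alt (s : String) : Bool := patternjAltList s.toList

-- ===== PRECONDITION & SPEC =====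
def Spec_patternj (s : String) (out : Bool) : Prop := out = patternj_alt s
instance (s : String) (out : Bool) : Decidable (Spec_patternj s out) := by unfold Spec_patternj; infer_instance

-- ===== CLAIM (what is proved, stated in full; the proofs are below) =====
def Claim_equal_patternj : Prop := ∀ (s : String), Dom_patternj s → Spec_patternj s (patternj s)

-- ===== LEMMAS AND PROOFS =====

-- the two-pointer loop checks exactly the mirrored positions between i and j
lemma palA_true_iff (l : List Char) :
    ∀ (d i j : Nat), j - i = d → j < l.length →
      (palA l (i : Int) (j : Int) = true ↔
        ∀ k : Nat, i ≤ k → k ≤ j → l[k]? = l[i + j - k]?) := by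
  intro d
  induction d using Nat.strong_induction_on with
  | _ d ih =>
    intro i j hd hj
    by_cases hij : i < j
    · rw [palA, dif_pos (show (i : Int) < (j : Int) by exact_mod_cast hij)]
      have h1 : ((i : Int) + 1) = (((i + 1 : Nat)) : Int) := by push_cast; ring
      have h2 : ((j : Int) - 1) = (((j - 1 : Nat)) : Int) := by omega
      simp only [PySem.List.pyGet?_natCast, h1, h2, ne_eq, ite_not]
      have hrec := ih (j - 1 - (i + 1)) (by omega) (i + 1) (j - 1) rfl (by omega)
      by_cases heq : l[i]? = l[j]?
      · rw [if_pos heq, hrec]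
        constructor
        · intro h k hk1 hk2
          rcases Nat.lt_or_ge k (i + 1) with hk | hk
          · have hki : k = i := by omega
            subst hki
            rw [show k + j - k = j by omega]
            exact heq
          · rcases Nat.lt_or_ge k j with hk' | hk'
            · have := h k hk (by omega)
              rw [show i + 1 + (j - 1) - k = i + j - k by omega] at this
              exact this
            · have hkj : k = j := by omega
              subst hkj
              rw [show i + k - k = i by omega]
              exact heq.symm
        · intro h k hk1 hk2
          have := h k (by omega) (by omega)
          rw [show i + j - k = i + 1 + (j - 1) - k by omega] at this
          exact this
      · rw [if_neg heq]
        refine ⟨fun h => absurd h (by simp), fun h => absurd ?_ heq⟩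
        have := h i le_rfl (by omega)
        rw [show i + j - i = j by omega] at this
        exact this
    · rw [palA, dif_neg (show ¬ ((i : Int) < (j : Int)) by exact_mod_cast hij)]
      constructor
      · intro _ k hk1 hk2
        have hkk : i + j - k = k := by omega
        rw [hkk]
      · intro _; rfl

-- the loop started at (0, n-1) is exactly the palindrome test
lemma palA_zero (l : List Char) (h : l ≠ []) :
    palA l 0 ((l.length : Int) - 1) = decide (l.reverse = l) := by
  have hn : 1 ≤ l.length := List.length_pos_iff.mpr h
  have h2 : ((l.length : Int) - 1) = (((l.length - 1 : Nat)) : Int) := by omega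
  rw [h2, show ((0 : Int)) = ((0 : Nat) : Int) by norm_num, Bool.eq_iff_iff,
    palA_true_iff l (l.length - 1 - 0) 0 (l.length - 1) rfl (by omega), decide_eq_true_iff]
  constructor
  · intro hk
    apply List.ext_getElem?
    intro k
    rcases Nat.lt_or_ge k l.length with hkl | hkl
    · rw [List.getElem?_reverse hkl]
      have := hk k (Nat.zero_le k) (by omega)
      rw [show 0 + (l.length - 1) - k = l.length - 1 - k by omega] at this
      exact this.symm
    · rw [List.getElem?_eq_none (by simpa using hkl), List.getElem?_eq_none hkl]
  · intro hrev k _ hk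
    have hkl : k < l.length := by omega
    have hg := List.getElem?_reverse (l := l) hkl
    rw [hrev] at hg
    rw [show 0 + (l.length - 1) - k = l.length - 1 - k by omega]
    exact hg

-- A's property is invariant under reversal: a palindrome IS its own reversal,
-- and on a non-palindrome both sides are false
lemma patternjList_reverse (l : List Char) : patternjList l.reverse = patternjList l := by
  by_cases hp : l.reverse = l
  · rw [hp]
  · have hne : l ≠ [] := by rintro rfl; exact hp rfl
    have hner : l.reverse ≠ [] := by simpa using hne
    conv_lhs => rw [patternjList]
    conv_rhs => rw [patternjList]
    simp only [List.length_reverse]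
    by_cases h1 : ((l.length : Int) == 1 || (l.length : Int) == 0) = true
    · rw [if_pos h1, if_pos h1]
    · rw [if_neg h1, if_neg h1, palA_zero l hne]
      have hz := palA_zero l.reverse hner
      rw [List.length_reverse] at hz
      rw [hz, List.reverse_reverse]
      have hp' : ¬ (l = l.reverse) := fun h => hp h.symm
      rw [decide_eq_false hp, decide_eq_false hp', if_neg (by simp), if_neg (by simp)]

-- main equivalence, by strong induction on the length
lemma patternjList_eq_alt (l : List Char) : patternjList l = patternjAltList l := by
  induction hn : l.length using Nat.strong_induction_on generalizing l with
  | _ n ih =>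
    subst hn
    rw [patternjList, patternjAltList]
    by_cases h1 : l.length ≤ 1
    · rw [if_pos (by simp only [beq_iff_eq, Bool.or_eq_true]; omega),
        if_neg (by omega)]
    · have hne : l ≠ [] := by rintro rfl; simp at h1
      rw [if_neg (by simp only [beq_iff_eq, Bool.or_eq_true, not_or]; omega),
        palA_zero l hne]
      conv_rhs => rw [if_pos (show l.length > 1 by omega)]
      rw [PySem.List.slice?_none_none_neg_one, Option.getD_some]
      have hfd1 : PySem.Int.floordiv ((l.length : Nat) : Int) 2 = ((l.length / 2 : Nat) : Int) := by
        exact_mod_cast PySem.Int.floordiv_natCast l.length 2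
      have hfd2 : PySem.Int.floordiv (((l.length : Nat) : Int) + 1) 2
          = (((l.length + 1) / 2 : Nat) : Int) := by
        have h := PySem.Int.floordiv_natCast (l.length + 1) 2
        push_cast at h ⊢
        exact h
      by_cases hp : l.reverse = l
      · rw [decide_eq_true hp, if_pos rfl, if_neg (show ¬ l ≠ l.reverse from fun hc => hc hp.symm),
          hfd1, hfd2, PySem.List.slice_to_natCast, PySem.List.slice_from_natCast]
        have hdrop : l.drop ((l.length + 1) / 2) = (l.take (l.length / 2)).reverse := by
          conv_lhs => rw [← hp]
          rw [List.drop_reverse]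
          simp only [List.length_reverse]
          rw [show l.length - (l.length + 1) / 2 = l.length / 2 by omega]
        rw [hdrop, patternjList_reverse, Bool.and_self]
        have hlt : (l.take (l.length / 2)).length < l.length := by
          simp only [List.length_take]
          omega
        exact ih _ hlt _ rfl
      · rw [decide_eq_false hp, if_neg (by simp),
          if_pos (show l ≠ l.reverse from fun h => hp h.symm)]

-- ===== VERDICT (by name: the statement is the Claim_ definition above) =====
theorem patternj_spec : Claim_equal_patternj := by
  intro s _
  unfold Spec_patternj patternj patternj_alt
  exact patternjList_eq_alt s.toList
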